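-- pv_equiv track=rewrite | github.com/jaca230/pioneerML | tests/data/test_time_grouping.py | _legacy_group
-- ===== SOURCE A (Python) =====
-- def _legacy_group(times, window):
--     """Reference implementation matching deprecated/omar_pioneerML grouping."""
--     hits = sorted(times)
--     groups = []
--     current = []
--     last = None
--     for t in hits:
--         if not current:
--             current.append(t)
--             last = t
--         elif abs(t - last) <= window:
--             current.append(t)
--             last = t
--         else:
--             groups.append(current)
--             current = [t]
--             last = t
--     if current:
--         groups.append(current)
--
--     # Map back to original order (first matching group assignment)
--     labels = []
--     for t in times:
--         for gid, grp in enumerate(groups):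
--             if grp and t in grp:
--                 labels.append(gid)
--                 grp.remove(t)  # avoid double use for duplicate times
--                 break
--     return labels
-- ===== SOURCE B (Python) =====
-- def _legacy_group(times, window):
--     """One sorted pass assigns each occurrence a group id into per-value queues;
--     original order is labelled by popping each value's next id (no nested scans)."""
--     ids = {}
--     gid = -1
--     last = None
--     for t in sorted(times):
--         if gid < 0 or abs(t - last) > window:
--             gid += 1
--         ids.setdefault(t, []).append(gid)
--         last = t
--     ptr = {}
--     out = []
--     for t in times:
--         i = ptr.get(t, 0)
--         out.append(ids[t][i])
--         ptr[t] = i + 1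
--     return out
-- ===== Notes on version B (the rewrite author's own statement) =====
-- stated objective: faster
-- what changed: A maps each original time back to its group by scanning the whole group list and calling list.remove per element (quadratic); B assigns group ids in the single sorted pass into per-value id queues and labels the original order by popping each value's next id with a per-value counter, removing the nested scan entirely.
import Mathlib
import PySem

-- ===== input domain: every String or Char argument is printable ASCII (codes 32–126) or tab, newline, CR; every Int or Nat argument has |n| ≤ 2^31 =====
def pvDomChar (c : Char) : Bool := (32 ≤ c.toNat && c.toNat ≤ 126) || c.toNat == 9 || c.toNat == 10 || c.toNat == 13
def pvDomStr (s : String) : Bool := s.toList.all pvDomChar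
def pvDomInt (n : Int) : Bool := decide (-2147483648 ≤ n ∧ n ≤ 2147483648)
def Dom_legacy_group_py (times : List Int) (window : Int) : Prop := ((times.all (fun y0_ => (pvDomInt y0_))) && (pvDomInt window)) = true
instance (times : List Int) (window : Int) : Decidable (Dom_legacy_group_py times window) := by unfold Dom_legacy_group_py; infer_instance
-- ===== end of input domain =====

-- B replaces A's quadratic label-back pass (inner scan over all groups + list.remove per time)
-- by per-value id queues built in the single sorted pass and popped in original order (objective: faster).

-- ===== PORT A =====
-- one step of A's grouping loop over the sorted list: state (groups, current, last)
def pvAStep (window : Int) (st : List (List Int) × List Int × Option Int) (t : Int) :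
    List (List Int) × List Int × Option Int :=
  match st with
  | (groups, current, last) =>
    if current.isEmpty then (groups, current ++ [t], some t)
    else if |t - last.getD 0| ≤ window then (groups, current ++ [t], some t)
    else (groups ++ [current], [t], some t)

-- A's inner 'for gid, grp in enumerate(groups): if grp and t in grp: …; break'
def pvFindRemove (t : Int) (gid : Int) : List (List Int) → Option (Int × List (List Int))
  | [] => none
  | grp :: rest =>
    if grp.isEmpty = false ∧ t ∈ grp then
      some (gid, ((PySem.List.remove? grp t).getD grp) :: rest)
    else
      match pvFindRemove t (gid + 1) rest with
      | some (g, rs) => some (g, grp :: rs)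
      | none => none

def pvAReplayStep (acc : List Int × List (List Int)) (t : Int) : List Int × List (List Int) :=
  match pvFindRemove t 0 acc.2 with
  | some (g, gs) => (acc.1 ++ [g], gs)
  | none => acc

def legacy_group_py (times : List Int) (window : Int) : List Int :=
  let hits := PySem.List.sorted times (fun x => x) false
  let st := hits.foldl (pvAStep window) ([], [], none)
  let groups := if st.2.1.isEmpty then st.1 else st.1 ++ [st.2.1]
  (times.foldl pvAReplayStep ([], groups)).1

-- ===== PORT B =====
-- one step of B's single sorted pass: state (ids, gid, last); ids.setdefault(t, []).append(g)
def pvBStep (window : Int) (st : PySem.Dict Int (List Int) × Int × Option Int) (t : Int) :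
    PySem.Dict Int (List Int) × Int × Option Int :=
  match st with
  | (ids, gid, last) =>
    let g := if gid < 0 ∨ |t - last.getD 0| > window then gid + 1 else gid
    (ids.modify t [] (· ++ [g]), g, some t)

def pvBReplayStep (ids : PySem.Dict Int (List Int)) (acc : List Int × PySem.Dict Int Int)
    (t : Int) : List Int × PySem.Dict Int Int :=
  let i := acc.2.getD t 0
  (acc.1 ++ [(PySem.List.pyGet? (ids.getD t []) i).getD 0], acc.2.insert t (i + 1))

def legacy_group_py_alt (times : List Int) (window : Int) : List Int :=
  let st := (PySem.List.sorted times (fun x => x) false).foldl (pvBStep window)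
      (PySem.Dict.empty, -1, none)
  (times.foldl (pvBReplayStep st.1) ([], PySem.Dict.empty)).1

-- ===== PRECONDITION & SPEC =====
def Spec_legacy_group_py (times : List Int) (window : Int) (out : List Int) : Prop := out = legacy_group_py_alt times window
instance (times : List Int) (window : Int) (out : List Int) : Decidable (Spec_legacy_group_py times window out) := by unfold Spec_legacy_group_py; infer_instance

-- ===== CLAIM (what is proved, stated in full; the proofs are below) =====
def Claim_equal_legacy_group_py : Prop := ∀ (times : List Int) (window : Int), Dom_legacy_group_py times window → Spec_legacy_group_py times window (legacy_group_py times window)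

-- ===== LEMMAS AND PROOFS =====

-- the group ids of the copies of v held in a list of groups numbered from g0, in group order
def pvGidsOf (g0 : Int) (v : Int) : List (List Int) → List Int
  | [] => []
  | grp :: rest => List.replicate (grp.count v) g0 ++ pvGidsOf (g0 + 1) v rest

lemma pvGidsOf_append (v : Int) (c : List Int) :
    ∀ (gs : List (List Int)) (g0 : Int),
      pvGidsOf g0 v (gs ++ [c]) = pvGidsOf g0 v gs ++ List.replicate (c.count v) (g0 + gs.length) := by
  intro gs
  induction gs with
  | nil => intro g0; simp [pvGidsOf]
  | cons g rest ih =>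
    intro g0
    simp only [List.cons_append, pvGidsOf, ih (g0 + 1), List.append_assoc, List.length_cons]
    congr 3
    push_cast; ring

-- relation between A's and B's mid-loop states in the first (grouping) pass
def pvRel (stA : List (List Int) × List Int × Option Int)
    (stB : PySem.Dict Int (List Int) × Int × Option Int) : Prop :=
  (stA = ([], [], none) ∧ stB = (PySem.Dict.empty, -1, none))
  ∨ (stA.2.1 ≠ [] ∧ stA.2.2 = stB.2.2 ∧ stB.2.1 = (stA.1.length : Int) ∧
     ∀ v, pvGidsOf 0 v (stA.1 ++ [stA.2.1]) = stB.1.getD v [])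

lemma pvRel_step (w t : Int) (stA : List (List Int) × List Int × Option Int)
    (stB : PySem.Dict Int (List Int) × Int × Option Int) (h : pvRel stA stB) :
    pvRel (pvAStep w stA t) (pvBStep w stB t) := by
  obtain ⟨groups, current, lastA⟩ := stA
  obtain ⟨ids, gid, lastB⟩ := stB
  rcases h with ⟨hA, hB⟩ | ⟨hne, hlast, hgid, hv⟩
  · simp only [Prod.mk.injEq] at hA hB
    obtain ⟨rfl, rfl, rfl⟩ := hA
    obtain ⟨rfl, rfl, rfl⟩ := hB
    have hA' : pvAStep w ([], [], none) t = ([], [t], some t) := by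
      simp [pvAStep]
    have hB' : pvBStep w (PySem.Dict.empty, -1, none) t
        = (PySem.Dict.empty.modify t [] (· ++ [0]), 0, some t) := by
      simp [pvBStep]
    rw [hA', hB']
    refine Or.inr ⟨by simp, rfl, by simp, ?_⟩
    intro v
    by_cases hvt : v = t
    · rw [hvt]
      simp [pvGidsOf, PySem.Dict.getD_empty]
    · simp [pvGidsOf, PySem.Dict.getD_modify, PySem.Dict.getD_empty, hvt, Ne.symm hvt]
  · simp only at hne hlast hgid hv
    have hgid0 : ¬ gid < 0 := by rw [hgid]; exact not_lt.mpr (Int.natCast_nonneg _)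
    have hempty : current.isEmpty = false := by simpa [List.isEmpty_iff] using hne
    by_cases hc : |t - lastB.getD 0| ≤ w
    · have hA' : pvAStep w (groups, current, lastA) t = (groups, current ++ [t], some t) := by
        simp [pvAStep, hempty, hlast, hc]
      have hB' : pvBStep w (ids, gid, lastB) t
          = (ids.modify t [] (· ++ [gid]), gid, some t) := by
        have hcond : ¬ (gid < 0 ∨ w < |t - lastB.getD 0|) :=
          not_or.mpr ⟨hgid0, not_lt.mpr hc⟩
        simp [pvBStep, hcond]
      rw [hA', hB']
      refine Or.inr ⟨by simp, rfl, hgid, ?_⟩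
      intro v
      by_cases hvt : v = t
      · rw [hvt]
        rw [pvGidsOf_append t (current ++ [t]) groups 0, PySem.Dict.getD_modify, if_pos rfl,
          ← hv t, pvGidsOf_append t current groups 0]
        simp [List.count_append, List.replicate_succ', hgid, List.append_assoc]
      · rw [pvGidsOf_append v (current ++ [t]) groups 0, PySem.Dict.getD_modify, if_neg hvt,
          ← hv v, pvGidsOf_append v current groups 0]
        simp [List.count_append, Ne.symm hvt]
    · have hA' : pvAStep w (groups, current, lastA) t = (groups ++ [current], [t], some t) := by
        simp [pvAStep, hempty, hlast, hc]
      have hB' : pvBStep w (ids, gid, lastB) t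
          = (ids.modify t [] (· ++ [gid + 1]), gid + 1, some t) := by
        have hcond : gid < 0 ∨ w < |t - lastB.getD 0| := Or.inr (not_le.mp hc)
        simp [pvBStep, hcond]
      rw [hA', hB']
      refine Or.inr ⟨by simp, rfl, by simp [hgid], ?_⟩
      intro v
      by_cases hvt : v = t
      · rw [hvt]
        rw [pvGidsOf_append t [t] (groups ++ [current]) 0, PySem.Dict.getD_modify, if_pos rfl,
          ← hv t]
        simp [hgid]
      · rw [pvGidsOf_append v [t] (groups ++ [current]) 0, PySem.Dict.getD_modify, if_neg hvt,
          ← hv v]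
        simp [Ne.symm hvt]

lemma pvRel_foldl (w : Int) (s : List Int) :
    ∀ stA stB, pvRel stA stB →
      pvRel (s.foldl (pvAStep w) stA) (s.foldl (pvBStep w) stB) := by
  induction s with
  | nil => intro stA stB h; exact h
  | cons t rest ih => intro stA stB h; exact ih _ _ (pvRel_step w t stA stB h)

-- B's dict holds exactly count v s ids per value v
lemma pvB_len (w : Int) (s : List Int) :
    ∀ st, ∀ v : Int,
      (((s.foldl (pvBStep w) st).1).getD v []).length = ((st.1).getD v []).length + s.count v := by
  induction s with
  | nil => intro st v; simp
  | cons t rest ih =>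
    intro st v
    obtain ⟨ids, gid, last⟩ := st
    simp only [List.foldl_cons]
    rw [ih]
    by_cases hvt : v = t
    · rw [hvt]
      simp [pvBStep]
      omega
    · simp [pvBStep, PySem.Dict.getD_modify, hvt, Ne.symm hvt]

-- the find-first-group-and-remove step, characterised through pvGidsOf
lemma pvFindRemove_spec (t : Int) :
    ∀ (gs : List (List Int)) (g0 : Int) (h : pvGidsOf g0 t gs ≠ []),
      ∃ gs', pvFindRemove t g0 gs = some ((pvGidsOf g0 t gs).head h, gs') ∧
        pvGidsOf g0 t gs' = (pvGidsOf g0 t gs).tail ∧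
        ∀ w, w ≠ t → pvGidsOf g0 w gs' = pvGidsOf g0 w gs := by
  intro gs
  induction gs with
  | nil => intro g0 h; simp [pvGidsOf] at h
  | cons grp rest ih =>
    intro g0 h
    by_cases hmem : t ∈ grp
    · have hcnt : grp.count t ≠ 0 := by simpa [List.count_eq_zero] using hmem
      obtain ⟨n, hn⟩ : ∃ n, grp.count t = n + 1 := ⟨grp.count t - 1, by omega⟩
      have hne' : grp ≠ [] := by rintro rfl; simp at hmem
      have hrm : PySem.List.remove? grp t = some (grp.erase t) :=
        PySem.List.remove?_eq_some_erase grp t hmem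
      have hlist : pvGidsOf g0 t (grp :: rest)
          = g0 :: (List.replicate n g0 ++ pvGidsOf (g0 + 1) t rest) := by
        simp [pvGidsOf, hn, List.replicate_succ]
      have hh : (pvGidsOf g0 t (grp :: rest)).head h = g0 := by simp [hlist]
      refine ⟨grp.erase t :: rest, ?_, ?_, ?_⟩
      · rw [hh]
        simp [pvFindRemove, hne', hmem, hrm]
      · rw [hlist]
        simp [pvGidsOf, List.count_erase_self, hn]
      · intro w hw
        simp [pvGidsOf, List.count_erase_of_ne hw]
    · have hcnt : grp.count t = 0 := List.count_eq_zero.mpr hmem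
      have hlist : pvGidsOf g0 t (grp :: rest) = pvGidsOf (g0 + 1) t rest := by
        simp [pvGidsOf, hcnt]
      have h' : pvGidsOf (g0 + 1) t rest ≠ [] := by rw [← hlist]; exact h
      obtain ⟨rs, h1, h2, h3⟩ := ih (g0 + 1) h'
      refine ⟨grp :: rs, ?_, ?_, ?_⟩
      · have hh : (pvGidsOf g0 t (grp :: rest)).head h = (pvGidsOf (g0 + 1) t rest).head h' := by
          simp only [hlist]
        rw [hh]
        simp [pvFindRemove, hmem, h1]
      · rw [hlist] at h ⊢
        simp [pvGidsOf, hcnt, h2]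
      · intro w hw
        simp [pvGidsOf, h3 w hw]

-- the replay loops agree given the queue invariant
lemma pvReplay (ids : PySem.Dict Int (List Int)) :
    ∀ (rem : List Int) (gs : List (List Int)) (ptr : PySem.Dict Int Int) (acc : List Int),
      (∀ v, ∃ k : ℕ, ptr.getD v 0 = (k : Int) ∧ pvGidsOf 0 v gs = (ids.getD v []).drop k) →
      (∀ v, rem.count v ≤ (pvGidsOf 0 v gs).length) →
      (rem.foldl pvAReplayStep (acc, gs)).1 = (rem.foldl (pvBReplayStep ids) (acc, ptr)).1 := by
  intro rem
  induction rem with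
  | nil => intro gs ptr acc _ _; rfl
  | cons t rest ih =>
    intro gs ptr acc h1 h2
    obtain ⟨k, hk, hdrop⟩ := h1 t
    have hne : pvGidsOf 0 t gs ≠ [] := by
      intro h0
      have hc := h2 t
      rw [h0] at hc
      simp at hc
    obtain ⟨gs', hfr, htail, hother⟩ := pvFindRemove_spec t gs 0 hne
    have hdrop' : (ids.getD t []).drop k = pvGidsOf 0 t gs := hdrop.symm
    have hk_lt : k < (ids.getD t []).length := by
      by_contra hk'
      push Not at hk'
      rw [List.drop_eq_nil_of_le hk'] at hdrop'
      exact hne hdrop'.symm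
    have hget : (ids.getD t [])[k]? = some ((pvGidsOf 0 t gs).head hne) := by
      rw [← List.head?_drop, hdrop', List.head?_eq_some_head hne]
    have hpy : PySem.List.pyGet? (ids.getD t []) (k : Int) = some ((pvGidsOf 0 t gs).head hne) := by
      rw [PySem.List.pyGet?_natCast]
      exact hget
    simp only [List.foldl_cons]
    have stepA : pvAReplayStep (acc, gs) t = (acc ++ [(pvGidsOf 0 t gs).head hne], gs') := by
      simp [pvAReplayStep, hfr]
    have stepB : pvBReplayStep ids (acc, ptr) t
        = (acc ++ [(pvGidsOf 0 t gs).head hne], ptr.insert t ((k : Int) + 1)) := by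
      simp [pvBReplayStep, hk, hpy]
    rw [stepA, stepB]
    apply ih
    · intro v
      by_cases hvt : v = t
      · refine ⟨k + 1, ?_, ?_⟩
        · rw [hvt]
          simp
        · rw [hvt, htail, ← hdrop', List.tail_drop]
      · obtain ⟨k', hk'1, hk'2⟩ := h1 v
        exact ⟨k', by simp [PySem.Dict.getD_insert, hvt]; exact hk'1,
          by rw [hother v hvt]; exact hk'2⟩
    · intro v
      by_cases hvt : v = t
      · have hc := h2 t
        rw [hvt, htail]
        rw [List.length_tail]
        simp at hc ⊢
        omega
      · have hc := h2 v
        rw [hother v hvt]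
        simp [Ne.symm hvt] at hc ⊢
        omega

-- ===== VERDICT (by name: the statement is the Claim_ definition above) =====
theorem legacy_group_py_spec : Claim_equal_legacy_group_py := by
  intro times window _
  unfold Spec_legacy_group_py legacy_group_py legacy_group_py_alt
  have hrel := pvRel_foldl window (PySem.List.sorted times (fun x => x) false)
    ([], [], none) (PySem.Dict.empty, -1, none) (Or.inl ⟨rfl, rfl⟩)
  have hlen := pvB_len window (PySem.List.sorted times (fun x => x) false)
    (PySem.Dict.empty, -1, none)
  have hperm := PySem.List.sorted_perm times (fun x => x) false
  apply pvReplay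
  · intro v
    refine ⟨0, by simp [PySem.Dict.getD_empty], ?_⟩
    rcases hrel with ⟨h1, h2⟩ | ⟨hne, _, _, hv⟩
    · simp [h1, h2, pvGidsOf, PySem.Dict.getD_empty]
    · rw [if_neg (show ¬_ by simpa [List.isEmpty_iff] using hne)]
      simpa using hv v
  · intro v
    have hcnt : ((((PySem.List.sorted times (fun x => x) false).foldl (pvBStep window)
          (PySem.Dict.empty, -1, none)).1.getD v []).length)
        = (PySem.List.sorted times (fun x => x) false).count v := by
      simpa [PySem.Dict.getD_empty] using hlen v
    rcases hrel with ⟨h1, h2⟩ | ⟨hne, _, _, hv⟩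
    · rw [h2] at hcnt
      simp [h1, pvGidsOf]
      have := hperm.count_eq v
      simp [PySem.Dict.getD_empty] at hcnt
      omega
    · rw [if_neg (show ¬_ by simpa [List.isEmpty_iff] using hne), hv v, hcnt, hperm.count_eq v]
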